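-- pv_equiv track=rewrite | github.com/yamabishi-okko/Pentaroll-react | cpu-python/main.py | has_five_in_line
-- ===== SOURCE A (Python) =====
-- from typing import List, Literal, Optional, Tuple
--
-- Player = Literal["black", "white"] # 手番が白瀬か黒瀬か
--
-- Cell = Optional[Player]  # なにもない / "黒駒" / "白駒"
--
-- def has_five_in_line(cells: List[Cell], color: Player) -> bool:
--     # 1列内で color が5連続あるか
--     run = 0
--     for v in cells:
--         if v == color:
--             run += 1
--             if run >= 5:
--                 return True
--         else:
--             run = 0
--     return False
-- ===== SOURCE B (Python) =====
-- def has_five_in_line(cells, color):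
--     # Build a 0/1 characterization string, then substring-search for five '1's.
--     return "11111" in "".join("1" if v == color else "0" for v in cells)
-- ===== Notes on version B (the rewrite author's own statement) =====
-- stated objective: idiomatic
-- what changed: Replaces the running-counter-with-early-exit loop by a build-then-search strategy: map each cell to '1'/'0', join to a string and test whether '11111' occurs as a substring.
import Mathlib
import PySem

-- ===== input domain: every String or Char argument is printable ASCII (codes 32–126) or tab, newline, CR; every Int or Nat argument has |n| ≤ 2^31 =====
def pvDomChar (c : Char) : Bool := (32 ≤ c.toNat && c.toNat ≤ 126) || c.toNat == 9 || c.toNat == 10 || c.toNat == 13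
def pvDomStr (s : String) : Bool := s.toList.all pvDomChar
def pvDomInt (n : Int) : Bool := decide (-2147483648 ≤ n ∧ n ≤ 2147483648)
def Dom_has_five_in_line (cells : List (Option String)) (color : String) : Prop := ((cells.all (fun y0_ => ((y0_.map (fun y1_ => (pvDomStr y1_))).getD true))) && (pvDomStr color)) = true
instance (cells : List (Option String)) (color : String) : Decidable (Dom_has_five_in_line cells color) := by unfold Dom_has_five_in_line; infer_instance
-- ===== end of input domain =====

-- B replaces A's running-counter loop with an idiomatic build-then-search: map cells to '1'/'0' and substring-search for "11111".

-- ===== PORT A =====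
-- the for-loop with its running counter and early return
def hasFiveGo (color : String) : List (Option String) → Int → Bool
  | [], _ => false
  | v :: rest, run =>
    if v == some color then
      if run + 1 ≥ 5 then true
      else hasFiveGo color rest (run + 1)
    else hasFiveGo color rest 0

def has_five_in_line (cells : List (Option String)) (color : String) : Bool :=
  hasFiveGo color cells 0

-- ===== PORT B =====
-- ''.join of one-char pieces is the char list itself; '11111' in s is PySem.Chars.isIn
def has_five_in_line_alt (cells : List (Option String)) (color : String) : Bool :=
  PySem.Chars.isIn ['1', '1', '1', '1', '1']
    (cells.map (fun v => if v == some color then '1' else '0'))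

-- ===== PRECONDITION & SPEC =====
def Spec_has_five_in_line (cells : List (Option String)) (color : String) (out : Bool) : Prop := out = has_five_in_line_alt cells color
instance (cells : List (Option String)) (color : String) (out : Bool) : Decidable (Spec_has_five_in_line cells color out) := by unfold Spec_has_five_in_line; infer_instance

-- ===== CLAIM (what is proved, stated in full; the proofs are below) =====
def Claim_equal_has_five_in_line : Prop := ∀ (cells : List (Option String)) (color : String), Dom_has_five_in_line cells color → Spec_has_five_in_line cells color (has_five_in_line cells color)

-- ===== LEMMAS AND PROOFS =====

theorem replicate_prefix_of_le {α : Type} {x : α} {l : List α} {k m : Nat}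
    (hkm : k ≤ m) (h : List.replicate m x <+: l) : List.replicate k x <+: l := by
  refine List.IsPrefix.trans ?_ h
  exact List.prefix_replicate_iff.mpr ⟨by simpa using hkm, by simp⟩

theorem hasFiveGo_iff (color : String) (cells : List (Option String)) :
    ∀ r : Nat, r ≤ 4 →
      (hasFiveGo color cells (r : Int) = true ↔
        (List.replicate (5 - r) '1' <+: cells.map (fun v => if v == some color then '1' else '0') ∨
         List.replicate 5 '1' <:+: cells.map (fun v => if v == some color then '1' else '0'))) := by
  induction cells with
  | nil =>
    intro r hr
    simp [hasFiveGo, List.replicate, Nat.sub_eq_zero_iff_le]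
    omega
  | cons v rest ih =>
    intro r hr
    by_cases hv : v == some color
    · simp only [List.map_cons, hv, if_pos]
      by_cases h5 : r = 4
      · subst h5
        simp only [hasFiveGo, hv, if_pos]
        norm_num
      · have hlt : r < 4 := by omega
        have hcond : ¬ ((r : Int) + 1 ≥ 5) := by omega
        have hrec : hasFiveGo color (v :: rest) (r : Int) = hasFiveGo color rest ((r : Int) + 1) := by
          simp [hasFiveGo, hv, hcond]
        have hcast : ((r : Int) + 1) = ((r + 1 : Nat) : Int) := by push_cast; ring
        rw [hrec, hcast, ih (r + 1) (by omega)]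
        have h51 : 5 - r = (5 - (r + 1)) + 1 := by omega
        constructor
        · rintro (hpre | hinf)
          · left
            rw [h51, List.replicate_succ]
            exact List.cons_prefix_cons.mpr ⟨rfl, hpre⟩
          · right
            exact hinf.trans (List.suffix_cons _ _).isInfix
        · rintro (hpre | hinf)
          · rw [h51, List.replicate_succ] at hpre
            exact Or.inl (List.cons_prefix_cons.mp hpre).2
          · rcases (List.infix_cons_iff.mp hinf) with hpre | hinf'
            · rw [show (5 : Nat) = 4 + 1 from rfl, List.replicate_succ] at hpre
              have h4 : List.replicate 4 '1' <+: rest.map (fun v => if v == some color then '1' else '0') :=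
                (List.cons_prefix_cons.mp hpre).2
              exact Or.inl (replicate_prefix_of_le (by omega) h4)
            · exact Or.inr hinf'
    · simp only [List.map_cons, hv, if_neg, Bool.false_eq_true, not_false_iff]
      have hrec : hasFiveGo color (v :: rest) (r : Int) = hasFiveGo color rest 0 := by
        simp [hasFiveGo, hv]
      rw [hrec, show (0 : Int) = ((0 : Nat) : Int) from rfl, ih 0 (by omega)]
      have hnopre : ∀ k : Nat, 0 < k → ¬ (List.replicate k '1' <+: ('0' :: rest.map (fun v => if v == some color then '1' else '0'))) := by
        intro k hk hpre
        rcases Nat.exists_eq_add_of_lt hk with ⟨m, hm⟩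
        rw [show k = m + 1 by omega, List.replicate_succ] at hpre
        exact absurd (List.cons_prefix_cons.mp hpre).1 (by decide)
      constructor
      · rintro (hpre | hinf)
        · exact Or.inr (hpre.isInfix.trans (List.suffix_cons _ _).isInfix)
        · right
          exact hinf.trans (List.suffix_cons _ _).isInfix
      · rintro (hpre | hinf)
        · exact absurd hpre (hnopre _ (by omega))
        · rcases List.infix_cons_iff.mp hinf with hpre | hinf'
          · exact absurd hpre (hnopre 5 (by omega))
          · right; exact hinf'

-- ===== VERDICT (by name: the statement is the Claim_ definition above) =====
theorem has_five_in_line_spec : Claim_equal_has_five_in_line := by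
  intro cells color _
  show has_five_in_line cells color = has_five_in_line_alt cells color
  have h := hasFiveGo_iff color cells 0 (by omega)
  have hrep : List.replicate 5 '1' = ['1', '1', '1', '1', '1'] := by decide
  unfold has_five_in_line has_five_in_line_alt
  rw [show (0 : Int) = ((0 : Nat) : Int) from rfl]
  rcases Bool.eq_false_or_eq_true (hasFiveGo color cells ((0 : Nat) : Int)) with hA | hA
  · rw [hA]
    symm
    rw [PySem.Chars.isIn_iff_infix]
    rcases h.mp hA with hpre | hinf
    · simpa [hrep] using hpre.isInfix
    · simpa [hrep] using hinf
  · rw [hA]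
    symm
    rw [PySem.Chars.isIn_eq_false_iff]
    intro hinf
    have htrue := h.mpr (Or.inr (by rw [hrep]; exact hinf))
    rw [hA] at htrue
    exact Bool.false_ne_true htrue
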